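-- pv_equiv track=rewrite | github.com/NunoMCSilva/My-Advent-of-Code-2017-Solutions | solutions/day9/solver2.py | count_garbage_size
-- ===== SOURCE A (Python) =====
-- def count_garbage_size(stream):
--     garbage_counter = 0
--     yielded_flag = False
--     ignore_flag = False
--     for char in stream:
--         if ignore_flag:
--             if char == '>':
--                 ignore_flag = False
--                 yield garbage_counter
--                 yielded_flag = True
--                 garbage_counter = 0
--                 continue
--             else:
--                 garbage_counter += 1
--         else:
--             if char == '<':
--                 ignore_flag = True
--                 continue
--             else:
--                 pass
--     if not yielded_flag:
--         yield 0
-- ===== SOURCE B (Python) =====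
-- def count_garbage_size(stream):
--     it = iter(stream)
--     yielded = False
--     for char in it:
--         if char == '<':
--             count = 0
--             for c in it:
--                 if c == '>':
--                     yield count
--                     yielded = True
--                     break
--                 count += 1
--     if not yielded:
--         yield 0
-- ===== Notes on version B (the rewrite author's own statement) =====
-- stated objective: simpler
-- what changed: Replaces the single flagged pass with its ignore_flag state machine by a nested consumption of one shared iterator: an outer loop scans for '<' and an inner loop counts characters until '>', yielding the count; no ignore_flag state variable remains.
import Mathlib
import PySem

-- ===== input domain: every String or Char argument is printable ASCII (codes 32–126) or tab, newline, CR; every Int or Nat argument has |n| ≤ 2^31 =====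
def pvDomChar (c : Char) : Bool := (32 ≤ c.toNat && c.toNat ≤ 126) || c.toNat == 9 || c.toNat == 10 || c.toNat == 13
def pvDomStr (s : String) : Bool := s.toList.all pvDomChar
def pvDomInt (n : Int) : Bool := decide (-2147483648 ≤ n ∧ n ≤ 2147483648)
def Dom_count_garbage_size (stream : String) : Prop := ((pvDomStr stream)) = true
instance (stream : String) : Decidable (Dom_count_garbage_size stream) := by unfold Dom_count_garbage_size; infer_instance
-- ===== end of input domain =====

-- B replaces A's ignore_flag state machine by a nested consumption of one shared
-- iterator (outer scan for '<', inner count-until-'>'); objective: simpler.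


-- ===== PORT A =====
-- the single for-loop with state (garbage_counter, yielded_flag, ignore_flag);
-- the trailing 'if not yielded_flag: yield 0' is the base case
def aLoop (cs : List Char) (gc : Int) (yf ig : Bool) : List Int :=
  match cs with
  | [] => if yf then [] else [0]
  | c :: rest =>
    if ig then
      if c = '>' then gc :: aLoop rest 0 true false
      else aLoop rest (gc + 1) yf ig
    else
      if c = '<' then aLoop rest gc yf true
      else aLoop rest gc yf ig

def count_garbage_size (stream : String) : List Int :=
  aLoop stream.toList 0 false false

-- ===== PORT B =====
-- inner loop: consume the shared iterator counting until '>'; returns the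
-- yielded count (none if the iterator is exhausted) and the remaining iterator
def bInner (cs : List Char) (count : Int) : Option Int × List Char :=
  match cs with
  | [] => (none, [])
  | c :: rest => if c = '>' then (some count, rest) else bInner rest (count + 1)

theorem bInner_len (cs : List Char) (n : Int) : (bInner cs n).2.length ≤ cs.length := by
  induction cs generalizing n with
  | nil => simp [bInner]
  | cons c rest ih =>
    simp only [bInner]
    split
    · simp
    · exact le_trans (ih _) (Nat.le_succ _)

-- outer loop: scan the shared iterator for '<', then run the inner loop
def bOuter (cs : List Char) (yielded : Bool) : List Int :=
  match cs with
  | [] => if yielded then [] else [0]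
  | c :: rest =>
    if c = '<' then
      match h : bInner rest 0 with
      | (some n, rest') => n :: bOuter rest' true
      | (none, rest') => bOuter rest' yielded
    else bOuter rest yielded
termination_by cs.length
decreasing_by
  · have := bInner_len rest 0; rw [h] at this; simpa using Nat.lt_succ_of_le this
  · have := bInner_len rest 0; rw [h] at this; simpa using Nat.lt_succ_of_le this
  · simp

def count_garbage_size_alt (stream : String) : List Int :=
  bOuter stream.toList false

-- ===== PRECONDITION & SPEC =====
def Spec_count_garbage_size (stream : String) (out : List Int) : Prop := out = count_garbage_size_alt stream
instance (stream : String) (out : List Int) : Decidable (Spec_count_garbage_size stream out) := by unfold Spec_count_garbage_size; infer_instance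

-- ===== CLAIM (what is proved, stated in full; the proofs are below) =====
def Claim_equal_count_garbage_size : Prop := ∀ (stream : String), Dom_count_garbage_size stream → Spec_count_garbage_size stream (count_garbage_size stream)

-- ===== LEMMAS AND PROOFS =====

-- A in ignore mode computes exactly what B's inner loop yields
theorem aLoop_ignore (cs : List Char) (gc : Int) (yf : Bool) :
    aLoop cs gc yf true =
      match bInner cs gc with
      | (some n, r) => n :: aLoop r 0 true false
      | (none, _) => if yf then [] else [0] := by
  induction cs generalizing gc with
  | nil => simp [aLoop, bInner]
  | cons c rest ih =>
    by_cases hc : c = '>'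
    · simp [aLoop, bInner, hc]
    · simp only [aLoop, bInner, if_neg hc]
      exact ih (gc + 1)

theorem bInner_none_nil (cs : List Char) (n : Int) (h : (bInner cs n).1 = none) :
    (bInner cs n).2 = [] := by
  induction cs generalizing n with
  | nil => simp [bInner]
  | cons c rest ih =>
    simp only [bInner] at h ⊢
    split at h
    · simp at h
    · simp only [*] ; exact ih _ h

theorem aLoop_eq_bOuter (cs : List Char) (yf : Bool) :
    aLoop cs 0 yf false = bOuter cs yf := by
  induction hn : cs.length using Nat.strong_induction_on generalizing cs yf with
  | _ k ih =>
    match cs with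
    | [] => simp [aLoop, bOuter]
    | c :: rest =>
      by_cases hc : c = '<'
      · rw [aLoop, if_neg (by decide), if_pos hc, bOuter, if_pos hc, aLoop_ignore]
        match h : bInner rest 0 with
        | (some n, r) =>
          have hlen : r.length < k := by
            have := bInner_len rest 0; rw [h] at this
            subst hn; simpa using Nat.lt_succ_of_le this
          simp only []
          rw [ih r.length hlen r true rfl]
        | (none, r) =>
          have hr : r = [] := by
            have := bInner_none_nil rest 0 (by rw [h]); rwa [h] at this
          simp only [hr, bOuter]
      · rw [aLoop, if_neg (by decide), if_neg hc, bOuter, if_neg hc]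
        exact ih rest.length (by subst hn; simp) rest yf rfl

-- ===== VERDICT (by name: the statement is the Claim_ definition above) =====
theorem count_garbage_size_spec : Claim_equal_count_garbage_size := by
  intro stream _
  unfold Spec_count_garbage_size count_garbage_size count_garbage_size_alt
  exact aLoop_eq_bOuter _ _
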